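-- pv_equiv track=rewrite | github.com/bryanbernigen/ITBSem3 | Matdis/XOR.py | xorfull
-- ===== SOURCE A (Python) =====
-- def xorfull(pesan):
--     fullkey = chr(0)
--     hasil = [0 for i in range(256)]
--     for j in range(255):
--         for i in range(len(pesan)):
--             hasil[ord(pesan[i]) ^ ord(fullkey)] += 1
--         fullkey = chr(ord(fullkey)+1)
--     return hasil
-- ===== SOURCE B (Python) =====
-- def xorfull(pesan):
--     freq = [0] * 256
--     for ch in pesan:
--         freq[ord(ch)] += 1
--     n = len(pesan)
--     return [n - freq[255 ^ v] for v in range(256)]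
-- ===== Notes on version B (the rewrite author's own statement) =====
-- stated objective: faster
-- what changed: Replaces the 255-key double loop with a single character-frequency pass: since XOR by a fixed key is a bijection, hasil[v] counts every (char, key) pair except the one key 255^... making each entry n - freq[255 ^ v].
import Mathlib
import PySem

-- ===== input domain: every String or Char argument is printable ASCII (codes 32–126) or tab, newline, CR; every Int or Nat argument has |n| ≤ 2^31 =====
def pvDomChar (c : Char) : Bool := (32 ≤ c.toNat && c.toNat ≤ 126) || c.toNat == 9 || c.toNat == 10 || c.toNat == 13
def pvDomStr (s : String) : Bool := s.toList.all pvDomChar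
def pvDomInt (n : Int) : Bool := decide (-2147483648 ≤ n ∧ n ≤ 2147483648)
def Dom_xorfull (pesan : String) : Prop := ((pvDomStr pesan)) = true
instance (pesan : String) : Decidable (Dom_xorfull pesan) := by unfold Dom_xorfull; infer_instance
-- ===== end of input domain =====

set_option maxRecDepth 10000

-- B replaces A's 255-key double loop by one frequency pass (hasil[v] = n - freq[255^v]); objective: faster (constant factor).

-- ===== PORT A =====
def xorfull (pesan : String) : List Int :=
  let cs := pesan.toList
  let hasil : List Int := (List.range 256).map (fun _ => (0 : Int))
  let res :=
    (PySem.List.pyRange 0 255 1).foldl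
      (fun (st : List Int × Nat) (_j : Int) =>
        ((PySem.List.pyRange 0 (cs.length : Int) 1).foldl
          (fun h i =>
            h.set ((PySem.List.pyGetD cs i ' ').toNat ^^^ st.2)
              (h.getD ((PySem.List.pyGetD cs i ' ').toNat ^^^ st.2) 0 + 1)) st.1,
         st.2 + 1))
      (hasil, 0)
  res.1

-- ===== PORT B =====
def xorfull_alt (pesan : String) : List Int :=
  let freq := pesan.toList.foldl
    (fun f ch => f.set ch.toNat (f.getD ch.toNat 0 + 1))
    ((List.range 256).map (fun _ => (0 : Int)))
  let n : Int := pesan.toList.length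
  (List.range 256).map (fun v => n - freq.getD (255 ^^^ v) 0)

-- ===== PRECONDITION & SPEC =====
def Spec_xorfull (pesan : String) (out : List Int) : Prop := out = xorfull_alt pesan
instance (pesan : String) (out : List Int) : Decidable (Spec_xorfull pesan out) := by unfold Spec_xorfull; infer_instance

-- ===== CLAIM (what is proved, stated in full; the proofs are below) =====
def Claim_equal_xorfull : Prop := ∀ (pesan : String), Dom_xorfull pesan → Spec_xorfull pesan (xorfull pesan)

-- ===== LEMMAS AND PROOFS =====

/-- Increment-at-index fold: length is preserved and each in-range slot counts the hits. -/
theorem pv_incr_foldl {α : Type} (g : α → Nat) (l : List α) (h : List Int) :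
    ((l.foldl (fun h c => h.set (g c) (h.getD (g c) 0 + 1)) h).length = h.length) ∧
    (∀ v, v < h.length →
      (l.foldl (fun h c => h.set (g c) (h.getD (g c) 0 + 1)) h).getD v 0
        = h.getD v 0 + (l.countP (fun c => g c == v) : Int)) := by
  induction l generalizing h with
  | nil => simp
  | cons c t ih =>
    obtain ⟨ihlen, ihv⟩ := ih (h.set (g c) (h.getD (g c) 0 + 1))
    refine ⟨by simpa using ihlen, ?_⟩
    intro v hv
    simp only [List.foldl_cons]
    rw [ihv v (by simpa using hv)]
    by_cases hc : g c = v
    · subst hc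
      rw [List.getD_eq_getElem _ _ (by simpa using hv),
          List.getElem_set_self (by simpa using hv)]
      simp
      omega
    · have : (h.set (g c) (h.getD (g c) 0 + 1)).getD v 0 = h.getD v 0 := by
        simp [List.getD_eq_getElem?_getD, List.getElem?_set_ne hc]
      rw [this]
      simp [hc]

/-- Sum of a point indicator over `range n`. -/
theorem pv_point_sum (a : Nat) : ∀ n : Nat,
    ((List.range n).map (fun j => if j = a then (1 : Int) else 0)).sum
      = if a < n then 1 else 0 := by
  intro n
  induction n with
  | zero => simp
  | succ m ih =>
    rw [List.range_succ]
    simp only [List.map_append, List.sum_append, List.map_cons, List.map_nil,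
      List.sum_cons, List.sum_nil, ih]
    by_cases h : m = a <;> by_cases h2 : a < m <;> simp_all <;> omega

theorem pv_xor_lt (a b : Nat) (ha : a < 256) (hb : b < 256) : a ^^^ b < 256 := by
  have := Nat.xor_lt_two_pow (n := 8) ha hb
  simpa using this

theorem pv_xor_eq_iff (c j v : Nat) : (c ^^^ j = v) ↔ (j = c ^^^ v) := by
  constructor
  · intro h; subst h; simp [← Nat.xor_assoc]
  · intro h; subst h; simp [← Nat.xor_assoc]

/-- One character's contribution over the 255 keys. -/
theorem pv_one (c v : Nat) (hc : c < 256) (hv : v < 256) :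
    ((List.range 255).map (fun j => if (c ^^^ j == v) then (1 : Int) else 0)).sum
      = if c = 255 ^^^ v then 0 else 1 := by
  have hrw : (fun j => if (c ^^^ j == v) then (1 : Int) else 0)
      = (fun j => if j = c ^^^ v then (1 : Int) else 0) := by
    funext j
    by_cases h : c ^^^ j = v
    · simp [(pv_xor_eq_iff c j v).mp h]
    · have : ¬ j = c ^^^ v := fun hj => h ((pv_xor_eq_iff c j v).mpr hj)
      simp [h, this]
  rw [hrw, pv_point_sum]
  have hlt : c ^^^ v < 256 := pv_xor_lt c v hc hv
  have heq : (c ^^^ v = 255) ↔ (c = 255 ^^^ v) := by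
    constructor
    · intro h; rw [← h]; simp [Nat.xor_assoc]
    · intro h; subst h; simp [Nat.xor_assoc]
  by_cases h : c = 255 ^^^ v
  · have : ¬ (c ^^^ v < 255) := by have := heq.mpr h; omega
    simp [h, this]
  · have : c ^^^ v < 255 := by
      have : c ^^^ v ≠ 255 := fun hx => h (heq.mp hx)
      omega
    simp [h, this]

/-- Swapping the two sums: total over the 255 keys per slot. -/
theorem pv_sum (v : Nat) (hv : v < 256) : ∀ (cs : List Char), (∀ c ∈ cs, c.toNat < 256) →
    ((List.range 255).map (fun t => (cs.countP (fun c => c.toNat ^^^ t == v) : Int))).sum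
      = (cs.length : Int) - (cs.countP (fun c => c.toNat == 255 ^^^ v) : Int) := by
  intro cs
  induction cs with
  | nil => intro _; simp
  | cons c t ih =>
    intro hall
    have hc : c.toNat < 256 := hall c (by simp)
    have ht : ∀ x ∈ t, x.toNat < 256 := fun x hx => hall x (by simp [hx])
    have hsplit : (fun j => ((c :: t).countP (fun c => c.toNat ^^^ j == v) : Int))
        = (fun j => (if (c.toNat ^^^ j == v) then (1 : Int) else 0)
            + (t.countP (fun c => c.toNat ^^^ j == v) : Int)) := by
      funext j
      rw [List.countP_cons]
      push_cast
      by_cases h : (c.toNat ^^^ j == v) = true <;> simp [h] <;> ring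
    rw [hsplit]
    have := PySem.List.sum_map_add_int (List.range 255)
      (fun j => if (c.toNat ^^^ j == v) then (1 : Int) else 0)
      (fun j => (t.countP (fun c => c.toNat ^^^ j == v) : Int))
    rw [this, pv_one c.toNat v hc hv, ih ht]
    rw [List.countP_cons, List.length_cons]
    by_cases h : c.toNat = 255 ^^^ v <;> simp [h] <;> push_cast <;> ring

/-- The outer fold of port A: the key element is ignored, the state's counter steps by 1. -/
theorem pv_outer (cs : List Char) (l : List Int) :
    ∀ (k : Nat) (h : List Int), h.length = 256 →
    ((l.foldl (fun (st : List Int × Nat) (_j : Int) =>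
        (cs.foldl (fun hh c => hh.set (c.toNat ^^^ st.2) (hh.getD (c.toNat ^^^ st.2) 0 + 1)) st.1,
         st.2 + 1)) (h, k)).1.length = 256) ∧
    (∀ v, v < 256 →
      (l.foldl (fun (st : List Int × Nat) (_j : Int) =>
        (cs.foldl (fun hh c => hh.set (c.toNat ^^^ st.2) (hh.getD (c.toNat ^^^ st.2) 0 + 1)) st.1,
         st.2 + 1)) (h, k)).1.getD v 0
        = h.getD v 0
          + ((List.range l.length).map
              (fun t => (cs.countP (fun c => c.toNat ^^^ (k + t) == v) : Int))).sum) := by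
  induction l with
  | nil => intro k h hh; exact ⟨hh, by simp⟩
  | cons x xs ih =>
    intro k h hh
    have inner := pv_incr_foldl (fun c : Char => c.toNat ^^^ k) cs h
    have hlen1 : (cs.foldl (fun hh c => hh.set (c.toNat ^^^ k) (hh.getD (c.toNat ^^^ k) 0 + 1)) h).length = 256 := by
      rw [inner.1, hh]
    obtain ⟨rlen, rv⟩ := ih (k + 1)
      (cs.foldl (fun hh c => hh.set (c.toNat ^^^ k) (hh.getD (c.toNat ^^^ k) 0 + 1)) h) hlen1
    refine ⟨rlen, ?_⟩
    intro v hv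
    simp only [List.foldl_cons]
    rw [rv v hv, inner.2 v (by omega)]
    have hshift : ((List.range (x :: xs).length).map
        (fun t => (cs.countP (fun c => c.toNat ^^^ (k + t) == v) : Int))).sum
        = (cs.countP (fun c => c.toNat ^^^ k == v) : Int)
          + ((List.range xs.length).map
              (fun t => (cs.countP (fun c => c.toNat ^^^ (k + 1 + t) == v) : Int))).sum := by
      have hmap : (List.range xs.length).map
            ((fun t => (cs.countP (fun c => c.toNat ^^^ (k + t) == v) : Int)) ∘ Nat.succ)
          = (List.range xs.length).map
            (fun t => (cs.countP (fun c => c.toNat ^^^ (k + 1 + t) == v) : Int)) := by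
        apply List.map_congr_left
        intro t _
        simp only [Function.comp_apply, Nat.succ_eq_add_one]
        rw [show k + (t + 1) = k + 1 + t by omega]
      rw [List.length_cons, List.range_succ_eq_map, List.map_cons, List.map_map, List.sum_cons,
        hmap]
      norm_num
    rw [hshift]
    ring

-- ===== VERDICT (by name: the statement is the Claim_ definition above) =====
theorem xorfull_spec : Claim_equal_xorfull := by
  intro pesan hdom
  unfold Spec_xorfull xorfull xorfull_alt
  set cs := pesan.toList with hcs
  have hchars : ∀ c ∈ cs, c.toNat < 256 := by
    intro c hc
    have := List.all_eq_true.mp hdom c hc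
    unfold pvDomChar at this
    simp only [Bool.or_eq_true, Bool.and_eq_true, decide_eq_true_eq, beq_iff_eq] at this
    omega
  -- rewrite port A's inner index loop into a fold over the characters
  have hstep : (fun (st : List Int × Nat) (_j : Int) =>
      ((PySem.List.pyRange 0 (cs.length : Int) 1).foldl
        (fun h i =>
          h.set ((PySem.List.pyGetD cs i ' ').toNat ^^^ st.2)
            (h.getD ((PySem.List.pyGetD cs i ' ').toNat ^^^ st.2) 0 + 1)) st.1,
       st.2 + 1))
      = (fun (st : List Int × Nat) (_j : Int) =>
        (cs.foldl (fun hh c => hh.set (c.toNat ^^^ st.2) (hh.getD (c.toNat ^^^ st.2) 0 + 1)) st.1,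
         st.2 + 1)) := by
    funext st _j
    rw [PySem.List.foldl_pyRange_zero_pyGetD' cs ' '
      (fun hh c => hh.set (c.toNat ^^^ st.2) (hh.getD (c.toNat ^^^ st.2) 0 + 1)) st.1]
  simp only [hstep]
  have hinit : ((List.range 256).map (fun _ => (0 : Int))).length = 256 := by simp
  obtain ⟨hAlen, hAv⟩ := pv_outer cs (PySem.List.pyRange 0 255 1) 0
    ((List.range 256).map (fun _ => (0 : Int))) hinit
  obtain ⟨hFlen, hFv⟩ := pv_incr_foldl (fun c : Char => c.toNat) cs
    ((List.range 256).map (fun _ => (0 : Int)))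
  apply List.ext_getElem
  · rw [hAlen]; simp
  · intro v hv1 hv2
    have hv : v < 256 := hAlen ▸ hv1
    have hgetD : ∀ (l : List Int) (hl : v < l.length), l[v]'hl = l.getD v 0 := by
      intro l hl
      simp [List.getD_eq_getElem?_getD, List.getElem?_eq_getElem hl]
    rw [hgetD _ hv1, hgetD _ hv2, hAv v hv]
    have hlenpr : (PySem.List.pyRange 0 255 1).length = 255 := by decide
    rw [hlenpr]
    have hzero : ∀ w, w < 256 → ((List.range 256).map (fun _ => (0 : Int))).getD w 0 = 0 := by
      intro w hw
      rw [List.getD_eq_getElem _ _ (by simpa using hw), List.getElem_map]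
    have hx : 255 ^^^ v < 256 := pv_xor_lt 255 v (by omega) hv
    have hsum := pv_sum v hv cs hchars
    have hnorm : ((List.range 255).map
        (fun t => (cs.countP (fun c => c.toNat ^^^ (0 + t) == v) : Int))).sum
        = ((List.range 255).map
        (fun t => (cs.countP (fun c => c.toNat ^^^ t == v) : Int))).sum := by
      simp
    rw [hzero v hv, hnorm, hsum]
    -- B side
    rw [PySem.List.getD_map_range _ _ _ _ hv]
    rw [hFv (255 ^^^ v) (by simpa using hx), hzero _ hx]
    ring
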